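-- pv_equiv track=rewrite | github.com/thedeutschmark/alert-alert | app.py | looks_like_age_restricted_issue
-- ===== SOURCE A (Python) =====
-- def looks_like_age_restricted_issue(stderr_text):
--     s = (stderr_text or "").lower()
--     markers = [
--         "age-restricted",
--         "sign in to confirm your age",
--         "confirm your age",
--         "this video may be inappropriate",
--         "this content may be inappropriate",
--     ]
--     return any(m in s for m in markers)
-- ===== SOURCE B (Python) =====
-- _MARKERS = (
--     "age-restricted",
--     "sign in to confirm your age",
--     "confirm your age",
--     "this video may be inappropriate",
--     "this content may be inappropriate",
-- )
--
-- def looks_like_age_restricted_issue(stderr_text):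
--     s = (stderr_text or "").lower()
--     # single left-to-right pass: at each position test whether some marker starts there
--     for i in range(len(s)):
--         if s.startswith(_MARKERS, i):
--             return True
--     return False
-- ===== Notes on version B (the rewrite author's own statement) =====
-- stated objective: alternative
-- what changed: Replaces five independent 'm in s' substring scans with a single left-to-right pass over the string that tests at each position whether any marker starts there (str.startswith with a tuple).
import Mathlib
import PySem

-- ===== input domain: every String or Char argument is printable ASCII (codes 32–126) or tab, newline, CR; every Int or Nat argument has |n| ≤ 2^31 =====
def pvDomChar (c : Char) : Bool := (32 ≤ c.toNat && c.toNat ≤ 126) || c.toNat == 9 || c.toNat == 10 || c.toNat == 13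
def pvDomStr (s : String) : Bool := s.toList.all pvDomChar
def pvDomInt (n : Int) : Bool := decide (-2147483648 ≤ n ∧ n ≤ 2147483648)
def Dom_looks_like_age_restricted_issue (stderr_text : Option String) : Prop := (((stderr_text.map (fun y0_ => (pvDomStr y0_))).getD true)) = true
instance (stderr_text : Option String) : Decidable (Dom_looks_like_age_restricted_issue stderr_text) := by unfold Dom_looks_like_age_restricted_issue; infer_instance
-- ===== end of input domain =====

-- B replaces five independent substring-containment scans with one left-to-right pass
-- testing at each position whether any marker starts there (alternative decomposition, same cost).


-- ===== PORT A =====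
def looks_like_age_restricted_issue (stderr_text : Option String) : Bool :=
  let s := PySem.Str.lower (stderr_text.getD "")
  [("age-restricted" : String),
   "sign in to confirm your age",
   "confirm your age",
   "this video may be inappropriate",
   "this content may be inappropriate"].any (fun m => PySem.Str.isIn m s)

-- ===== PORT B =====
-- the same five markers, as character lists (tuple _MARKERS in Source B)
def pvMarkers : List String :=
  ["age-restricted",
   "sign in to confirm your age",
   "confirm your age",
   "this video may be inappropriate",
   "this content may be inappropriate"]

-- the loop of Source B: walk the string once; at each position i test s.startswith(_MARKERS, i)
def pvScan : List Char → Bool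
  | [] => false
  | c :: rest =>
    if pvMarkers.any (fun m => PySem.Chars.startswith (c :: rest) m.toList) then true
    else pvScan rest

def looks_like_age_restricted_issue_alt (stderr_text : Option String) : Bool :=
  let s := PySem.Str.lower (stderr_text.getD "")
  pvScan s.toList

-- ===== PRECONDITION & SPEC =====
def Spec_looks_like_age_restricted_issue (stderr_text : Option String) (out : Bool) : Prop := out = looks_like_age_restricted_issue_alt stderr_text
instance (stderr_text : Option String) (out : Bool) : Decidable (Spec_looks_like_age_restricted_issue stderr_text out) := by unfold Spec_looks_like_age_restricted_issue; infer_instance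

-- ===== CLAIM (what is proved, stated in full; the proofs are below) =====
def Claim_equal_looks_like_age_restricted_issue : Prop := ∀ (stderr_text : Option String), Dom_looks_like_age_restricted_issue stderr_text → Spec_looks_like_age_restricted_issue stderr_text (looks_like_age_restricted_issue stderr_text)

-- ===== LEMMAS AND PROOFS =====

lemma pvScan_iff (cs : List Char) :
    pvScan cs = true ↔ ∃ m ∈ pvMarkers, m.toList <:+: cs := by
  induction cs with
  | nil => simp only [pvScan]; decide
  | cons c rest ih =>
    simp only [pvScan]
    split_ifs with h
    · simp only [true_iff]
      rcases List.any_eq_true.mp h with ⟨m, hm, hs⟩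
      exact ⟨m, hm, ((PySem.Chars.startswith_iff _ _).mp hs).isInfix⟩
    · rw [ih]
      constructor
      · rintro ⟨m, hm, hinf⟩; exact ⟨m, hm, hinf.trans (List.suffix_cons c rest).isInfix⟩
      · rintro ⟨m, hm, hinf⟩
        rcases List.infix_cons_iff.mp hinf with hp | hs
        · exact absurd (List.any_eq_true.mpr ⟨m, hm, (PySem.Chars.startswith_iff _ _).mpr hp⟩) h
        · exact ⟨m, hm, hs⟩

-- ===== VERDICT (by name: the statement is the Claim_ definition above) =====
theorem looks_like_age_restricted_issue_spec : Claim_equal_looks_like_age_restricted_issue := by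
  intro stderr_text _
  unfold Spec_looks_like_age_restricted_issue
  unfold looks_like_age_restricted_issue looks_like_age_restricted_issue_alt
  rw [Bool.eq_iff_iff, pvScan_iff, List.any_eq_true]
  constructor
  · rintro ⟨m, hm, hin⟩
    exact ⟨m, hm, (PySem.Str.isIn_iff_infix _ _).mp hin⟩
  · rintro ⟨m, hm, hinf⟩
    exact ⟨m, hm, (PySem.Str.isIn_iff_infix _ _).mpr hinf⟩
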